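-- pv_equiv track=rewrite | github.com/VijayaraaghavanKS/Agentic_AI-GDG-Hackfest- | utils/helpers.py | extract_decisions_from_state
-- ===== SOURCE A (Python) =====
-- from typing import Any
--
-- def extract_decisions_from_state(state: dict[str, Any]) -> list[dict]:
--     """
--     Parse the trade_decision text block from session.state into a list
--     of structured decision dicts for the Streamlit UI.
--
--     Args:
--         state: The session.state dictionary.
--
--     Returns:
--         A list of dicts, each representing one ticker's trade decision.
--         Falls back to a single dict with raw text if parsing fails.
--
--     TODO: Replace this simple parser with a proper Pydantic output schema
--           once the DecisionMaker prompt is stabilised.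
--     """
--     raw: str = state.get("trade_decision", "")
--     if not raw:
--         return [{"error": "No trade decision found in session state."}]
--
--     decisions: list[dict] = []
--     current: dict = {}
--
--     for line in raw.splitlines():
--         line = line.strip()
--         if line.startswith("- ticker:"):
--             if current:
--                 decisions.append(current)
--             current = {"ticker": line.split(":", 1)[-1].strip()}
--         elif ":" in line and current:
--             k, _, v = line.partition(":")
--             current[k.strip().lstrip("- ")] = v.strip()
--
--     if current:
--         decisions.append(current)
--
--     return decisions if decisions else [{"raw": raw}]
-- ===== SOURCE B (Python) =====
-- def _parse_group(g):
--     d = {"ticker": g[0].split(":", 1)[-1].strip()}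
--     for line in g[1:]:
--         if ":" in line:
--             k, _, v = line.partition(":")
--             d[k.strip().lstrip("- ")] = v.strip()
--     return d
--
--
-- def extract_decisions_from_state(state):
--     raw = state.get("trade_decision", "")
--     if not raw:
--         return [{"error": "No trade decision found in session state."}]
--
--     # Phase 1: split the stripped lines into groups, one per "- ticker:" line,
--     # discarding anything before the first ticker line.
--     lines = raw.splitlines()
--     groups = []
--     i, n = 0, len(lines)
--     while i < n:
--         line = lines[i].strip()
--         i += 1
--         if line.startswith("- ticker:"):
--             g = [line]
--             while i < n:
--                 nxt = lines[i].strip()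
--                 if nxt.startswith("- ticker:"):
--                     break
--                 g.append(nxt)
--                 i += 1
--             groups.append(g)
--
--     if not groups:
--         return [{"raw": raw}]
--     # Phase 2: parse each group independently.
--     return [_parse_group(g) for g in groups]
-- ===== Notes on version B (the rewrite author's own statement) =====
-- stated objective: alternative
-- what changed: Replaces A's single interleaved fold carrying a (decisions, current-dict) state by a two-phase decomposition: first group the stripped lines into per-ticker blocks (discarding pre-first-ticker lines), then parse each block independently into a dict.
import Mathlib
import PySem

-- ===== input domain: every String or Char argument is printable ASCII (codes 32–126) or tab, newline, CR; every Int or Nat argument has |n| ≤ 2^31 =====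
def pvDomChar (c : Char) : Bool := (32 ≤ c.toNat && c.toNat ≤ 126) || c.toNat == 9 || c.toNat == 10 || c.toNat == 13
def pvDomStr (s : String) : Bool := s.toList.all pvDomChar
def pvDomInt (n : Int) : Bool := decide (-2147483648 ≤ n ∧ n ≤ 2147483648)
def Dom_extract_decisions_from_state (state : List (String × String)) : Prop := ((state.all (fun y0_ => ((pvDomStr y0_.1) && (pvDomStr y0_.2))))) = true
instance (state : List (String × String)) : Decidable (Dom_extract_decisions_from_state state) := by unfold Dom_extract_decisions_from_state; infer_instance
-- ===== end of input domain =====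

-- B restructures A's single interleaved (decisions, current) fold into two phases:
-- group the stripped lines into per-ticker blocks, then parse each block; same values.

-- ----- helpers shared by both ports (identical Python lines in both sources) -----

-- s.lstrip("- "): drop leading characters belonging to the set {'-', ' '} (exact)
def pvLstripKey (s : String) : String :=
  String.ofList (s.toList.dropWhile (fun c => c == '-' || c == ' '))

-- line.partition(":") for the single-character separator ":":
-- (text before the first ':', text after it); if no ':', (s, "") — exact for this sep
def pvPartitionColon (s : String) : String × String :=
  (String.ofList (s.toList.takeWhile (fun c => !(c == ':'))),
   String.ofList ((s.toList.dropWhile (fun c => !(c == ':'))).drop 1))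

-- line.split(":", 1)[-1].strip()  (split? never returns none for sep ":" ≠ "",
-- and the parts list is nonempty, so the getD defaults are unreachable)
def pvTickerOf (line : String) : String :=
  PySem.Str.strip ((PySem.List.pyGet? ((PySem.Str.splitMax? line ":" 1).getD []) (-1)).getD "")

-- ===== PORT A =====

-- the body of A's for-loop over raw.splitlines(), state = (decisions, current)
def pvStepA (acc : List (PySem.Dict String String) × PySem.Dict String String)
    (line0 : String) : List (PySem.Dict String String) × PySem.Dict String String :=
  let line := PySem.Str.strip line0
  if PySem.Str.startswith line "- ticker:" then
    ((if acc.2.items.isEmpty then acc.1 else acc.1 ++ [acc.2]),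
     PySem.Dict.mk [("ticker", pvTickerOf line)])
  else if PySem.Str.isIn ":" line && !acc.2.items.isEmpty then
    (acc.1,
     acc.2.insert (pvLstripKey (PySem.Str.strip (pvPartitionColon line).1))
                  (PySem.Str.strip (pvPartitionColon line).2))
  else acc

def extract_decisions_from_state (state : List (String × String)) : List (List (String × String)) :=
  let raw := (List.lookup "trade_decision" state).getD ""
  if raw = "" then [[("error", "No trade decision found in session state.")]]
  else
    let p := (PySem.Str.splitlines raw).foldl pvStepA ([], PySem.Dict.mk [])
    let decisions := if p.2.items.isEmpty then p.1 else p.1 ++ [p.2]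
    if decisions.isEmpty then [[("raw", raw)]] else decisions.map (fun d => d.items)

-- ===== PORT B =====

-- 'if ":" in line: k,_,v = line.partition(":"); d[k.strip().lstrip("- ")] = v.strip()'
def pvAddKV (d : PySem.Dict String String) (line : String) : PySem.Dict String String :=
  if PySem.Str.isIn ":" line then
    d.insert (pvLstripKey (PySem.Str.strip (pvPartitionColon line).1))
             (PySem.Str.strip (pvPartitionColon line).2)
  else d

-- inner while loop of Source B: collect (stripped) lines up to the next "- ticker:" line
def pvSpan : List String → List String × List String
  | [] => ([], [])
  | l :: rest =>
    if PySem.Str.startswith (PySem.Str.strip l) "- ticker:" then ([], l :: rest)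
    else ((PySem.Str.strip l) :: (pvSpan rest).1, (pvSpan rest).2)

theorem pvSpan_snd_length_le (ls : List String) : (pvSpan ls).2.length ≤ ls.length := by
  induction ls with
  | nil => simp [pvSpan]
  | cons l rest ih =>
    simp only [pvSpan]
    split
    · simp
    · simpa using Nat.le_succ_of_le ih

-- outer while loop of Source B: one group per "- ticker:" line
def pvGroups : List String → List (List String)
  | [] => []
  | l :: ls =>
    if PySem.Str.startswith (PySem.Str.strip l) "- ticker:" then
      (PySem.Str.strip l :: (pvSpan ls).1) :: pvGroups (pvSpan ls).2
    else pvGroups ls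
termination_by ls => ls.length
decreasing_by
  · exact Nat.lt_succ_of_le (pvSpan_snd_length_le ls)
  · simp

-- _parse_group(g): g = [] never occurs (every group starts with its ticker line)
def pvParseGroup (g : List String) : List (String × String) :=
  match g with
  | [] => []
  | t :: rest =>
    (rest.foldl pvAddKV (PySem.Dict.mk [("ticker", pvTickerOf t)])).items

def extract_decisions_from_state_alt (state : List (String × String)) : List (List (String × String)) :=
  let raw := (List.lookup "trade_decision" state).getD ""
  if raw = "" then [[("error", "No trade decision found in session state.")]]
  else
    let gs := pvGroups (PySem.Str.splitlines raw)
    if gs.isEmpty then [[("raw", raw)]]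
    else gs.map pvParseGroup

-- ===== PRECONDITION & SPEC =====
def Spec_extract_decisions_from_state (state : List (String × String)) (out : List (List (String × String))) : Prop := out = extract_decisions_from_state_alt state
instance (state : List (String × String)) (out : List (List (String × String))) : Decidable (Spec_extract_decisions_from_state state out) := by unfold Spec_extract_decisions_from_state; infer_instance

-- ===== CLAIM (what is proved, stated in full; the proofs are below) =====
def Claim_equal_extract_decisions_from_state : Prop := ∀ (state : List (String × String)), Dom_extract_decisions_from_state state → Spec_extract_decisions_from_state state (extract_decisions_from_state state)

-- ===== LEMMAS AND PROOFS =====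

-- the Dict-valued form of pvParseGroup, used to state the loop invariant
def pvParseD (g : List String) : PySem.Dict String String :=
  match g with
  | [] => PySem.Dict.mk []
  | t :: rest => rest.foldl pvAddKV (PySem.Dict.mk [("ticker", pvTickerOf t)])

theorem pvParseGroup_eq_items (g : List String) : pvParseGroup g = (pvParseD g).items := by
  cases g <;> rfl

theorem insert_items_ne_nil (d : PySem.Dict String String) (k v : String) :
    ((d.insert k v).items).isEmpty = false := by
  by_cases h : d.contains k = true
  · have hk : k ∈ d.keys := (PySem.Dict.contains_iff_mem_keys _ _).mp h
    have hne : d.items ≠ [] := by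
      intro hnil
      have : d.keys = [] := by simp [PySem.Dict.keys, hnil]
      simp [this] at hk
    rw [PySem.Dict.items_insert_of_contains _ _ h]
    simpa [List.isEmpty_iff] using hne
  · rw [PySem.Dict.items_insert_of_not_contains _ _ (by simpa using h)]
    simp

theorem addKV_items_ne_nil (d : PySem.Dict String String) (line : String)
    (h : d.items.isEmpty = false) : ((pvAddKV d line).items).isEmpty = false := by
  unfold pvAddKV
  split
  · exact insert_items_ne_nil _ _ _
  · exact h

theorem foldl_addKV_items_ne_nil (g : List String) (d : PySem.Dict String String)
    (h : d.items.isEmpty = false) : ((g.foldl pvAddKV d).items).isEmpty = false := by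
  induction g generalizing d with
  | nil => exact h
  | cons x xs ih => exact ih _ (addKV_items_ne_nil _ _ h)

-- a non-ticker line applied to a nonempty current is exactly pvAddKV on the stripped line
theorem stepA_nonticker (ds : List (PySem.Dict String String)) (cur : PySem.Dict String String)
    (l : String)
    (ht : PySem.Str.startswith (PySem.Str.strip l) "- ticker:" = false)
    (hc : cur.items.isEmpty = false) :
    pvStepA (ds, cur) l = (ds, pvAddKV cur (PySem.Str.strip l)) := by
  obtain hb | hb := Bool.eq_false_or_eq_true (PySem.Str.isIn ":" (PySem.Str.strip l)) <;>
    simp only [pvStepA, pvAddKV, ht, hc, hb, Bool.false_eq_true, if_false,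
      Bool.not_false, Bool.and_true, Bool.false_and, Bool.true_and,
      eq_self_iff_true, if_true]

-- span absorption: from a nonempty current, the fold first absorbs the span lines into it
theorem foldl_stepA_span (ls : List String) (ds : List (PySem.Dict String String))
    (cur : PySem.Dict String String) (hc : cur.items.isEmpty = false) :
    ls.foldl pvStepA (ds, cur)
      = (pvSpan ls).2.foldl pvStepA (ds, (pvSpan ls).1.foldl pvAddKV cur) := by
  induction ls generalizing cur with
  | nil => rfl
  | cons l rest ih =>
    obtain ht | ht := Bool.eq_false_or_eq_true (PySem.Str.startswith (PySem.Str.strip l) "- ticker:")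
    · simp only [pvSpan, ht, if_true, List.foldl_nil]
    · simp only [pvSpan, ht, Bool.false_eq_true, if_false, List.foldl_cons]
      rw [stepA_nonticker ds cur l ht hc]
      exact ih _ (addKV_items_ne_nil _ _ hc)
-- shape of the remainder of a span: empty, or headed by a ticker line
theorem pvSpan_snd_shape (ls : List String) :
    (pvSpan ls).2 = [] ∨
      ∃ l r, (pvSpan ls).2 = l :: r ∧
        PySem.Str.startswith (PySem.Str.strip l) "- ticker:" = true := by
  induction ls with
  | nil => left; rfl
  | cons l rest ih =>
    obtain ht | ht := Bool.eq_false_or_eq_true (PySem.Str.startswith (PySem.Str.strip l) "- ticker:")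
    · right
      exact ⟨l, rest, by simp only [pvSpan, ht, if_true], ht⟩
    · simpa only [pvSpan, ht, Bool.false_eq_true, if_false] using ih

-- main invariant: A's fold-then-finalize from an empty current produces exactly
-- the parsed groups, appended to the decisions accumulated so far
set_option maxHeartbeats 1600000 in
theorem foldl_stepA_groups : ∀ (ls : List String), ∀ (ds : List (PySem.Dict String String)),
    (if (List.foldl pvStepA (ds, PySem.Dict.mk []) ls).2.items.isEmpty
     then (List.foldl pvStepA (ds, PySem.Dict.mk []) ls).1
     else (List.foldl pvStepA (ds, PySem.Dict.mk []) ls).1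
          ++ [(List.foldl pvStepA (ds, PySem.Dict.mk []) ls).2])
    = ds ++ (pvGroups ls).map pvParseD := by
  intro ls
  induction ls using pvGroups.induct with
  | case1 => intro ds; simp [pvGroups]
  | case2 l ls ht ih =>
    intro ds
    have hstep : pvStepA (ds, PySem.Dict.mk []) l
        = (ds, PySem.Dict.mk [("ticker", pvTickerOf (PySem.Str.strip l))]) := by
      simp only [pvStepA, ht, if_true]
      simp [PySem.Dict.items]
    have hc0 : ((PySem.Dict.mk [("ticker", pvTickerOf (PySem.Str.strip l))] :
        PySem.Dict String String).items).isEmpty = false := rfl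
    have hc1 : (((pvSpan ls).1.foldl pvAddKV
        (PySem.Dict.mk [("ticker", pvTickerOf (PySem.Str.strip l))])).items).isEmpty = false :=
      foldl_addKV_items_ne_nil _ _ hc0
    simp only [List.foldl_cons, hstep]
    rw [foldl_stepA_span ls ds _ hc0]
    rcases pvSpan_snd_shape ls with hr | ⟨lr, rest, hr, htr⟩
    · simp only [hr, List.foldl_nil, hc1, Bool.false_eq_true, if_false]
      simp only [pvGroups, ht, if_true, hr, List.map_cons,
        List.map_nil, pvParseD]
    · have h1 : pvStepA (ds, (pvSpan ls).1.foldl pvAddKV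
            (PySem.Dict.mk [("ticker", pvTickerOf (PySem.Str.strip l))])) lr
          = (ds ++ [(pvSpan ls).1.foldl pvAddKV
              (PySem.Dict.mk [("ticker", pvTickerOf (PySem.Str.strip l))])],
             PySem.Dict.mk [("ticker", pvTickerOf (PySem.Str.strip lr))]) := by
        simp only [pvStepA, htr, if_true, hc1, Bool.false_eq_true, if_false]
      have h2 : pvStepA (ds ++ [(pvSpan ls).1.foldl pvAddKV
            (PySem.Dict.mk [("ticker", pvTickerOf (PySem.Str.strip l))])],
            PySem.Dict.mk []) lr
          = (ds ++ [(pvSpan ls).1.foldl pvAddKV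
              (PySem.Dict.mk [("ticker", pvTickerOf (PySem.Str.strip l))])],
             PySem.Dict.mk [("ticker", pvTickerOf (PySem.Str.strip lr))]) := by
        simp only [pvStepA, htr, if_true]
        simp [PySem.Dict.items]
      have hswap : (pvSpan ls).2.foldl pvStepA
          (ds, (pvSpan ls).1.foldl pvAddKV
            (PySem.Dict.mk [("ticker", pvTickerOf (PySem.Str.strip l))]))
          = (pvSpan ls).2.foldl pvStepA
            (ds ++ [(pvSpan ls).1.foldl pvAddKV
              (PySem.Dict.mk [("ticker", pvTickerOf (PySem.Str.strip l))])],
             PySem.Dict.mk []) := by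
        rw [hr, List.foldl_cons, h1, ← h2, ← List.foldl_cons]
      rw [hswap]
      rw [ih (ds ++ [(pvSpan ls).1.foldl pvAddKV
        (PySem.Dict.mk [("ticker", pvTickerOf (PySem.Str.strip l))])])]
      simp only [pvGroups, ht, if_true, hr, List.map_cons,
        List.append_assoc, List.singleton_append, pvParseD]
  | case3 l ls ht ih =>
    intro ds
    have hstep : pvStepA (ds, PySem.Dict.mk []) l = (ds, PySem.Dict.mk []) := by
      simp only [pvStepA, ht, Bool.false_eq_true, if_false]
      simp [PySem.Dict.items]
    simp only [List.foldl_cons, hstep]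
    rw [pvGroups]
    simp only [ht, Bool.false_eq_true, if_false]
    exact ih ds

-- ===== VERDICT (by name: the statement is the Claim_ definition above) =====
theorem extract_decisions_from_state_spec : Claim_equal_extract_decisions_from_state := by
  intro state _
  unfold Spec_extract_decisions_from_state
  simp only [extract_decisions_from_state, extract_decisions_from_state_alt]
  by_cases h0 : (List.lookup "trade_decision" state).getD "" = ""
  · simp only [h0, if_true]
  · simp only [h0, if_neg h0, if_false]
    rw [foldl_stepA_groups (PySem.Str.splitlines ((List.lookup "trade_decision" state).getD "")) []]
    simp only [List.nil_append]
    by_cases hg : pvGroups (PySem.Str.splitlines ((List.lookup "trade_decision" state).getD "")) = []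
    · simp [hg]
    · have hfun : pvParseGroup = fun g => (pvParseD g).items := funext pvParseGroup_eq_items
      simp [hg, hfun, List.map_map, Function.comp]
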